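-- pv_equiv track=rewrite | github.com/raduangelescu/stackem_bot | strategy/color_blast_ability_strategy.py | frequency_for_color
-- ===== SOURCE A (Python) =====
-- def frequency_for_color(board_c,col):
--     sum = 0
--     for i in range(0, len(board_c)):
--         for j in range(0, len(board_c[i])):
--             if(board_c[i][j] == col):
--                 sum = sum + 1
--                 board_c[i][j] = -2
--
--     return sum
-- ===== SOURCE B (Python) =====
-- def frequency_for_color(board_c, col):
--     total = sum(row.count(col) for row in board_c)
--     for row in board_c:
--         for j in range(len(row)):
--             if row[j] == col:
--                 row[j] = -2
--     return total
-- ===== Notes on version B (the rewrite author's own statement) =====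
-- stated objective: simpler
-- what changed: Replaces the single fused nested index-scan (count and mark in one pass) by two separate plain passes: an aggregate sum of per-row .count(col) for the return value, then an independent in-place marking pass; same mutation side effect is preserved.
import Mathlib
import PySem

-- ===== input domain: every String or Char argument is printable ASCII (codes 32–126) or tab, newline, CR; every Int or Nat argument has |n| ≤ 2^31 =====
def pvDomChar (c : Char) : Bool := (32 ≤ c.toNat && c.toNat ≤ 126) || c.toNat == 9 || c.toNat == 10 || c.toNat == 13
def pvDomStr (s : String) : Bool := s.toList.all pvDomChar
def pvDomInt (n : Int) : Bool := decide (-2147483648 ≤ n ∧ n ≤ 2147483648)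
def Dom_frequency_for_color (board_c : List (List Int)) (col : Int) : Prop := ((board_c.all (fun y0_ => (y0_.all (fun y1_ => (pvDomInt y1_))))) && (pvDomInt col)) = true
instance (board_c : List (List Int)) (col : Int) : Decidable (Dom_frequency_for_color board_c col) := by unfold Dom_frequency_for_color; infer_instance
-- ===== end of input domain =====

-- B separates counting from marking (two plain passes) instead of A's fused count-and-mark scan; objective: simpler.
-- Both Pythons mutate board_c in place identically; the equivalence proved here is about the RETURN value,
-- so the ports carry the board state only where it can influence the result (A's fused loop).

-- ===== PORT A =====
-- A's fused nested index loop: the state is (current board, sum); board_c[i][j] = -2 is a functional set.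
def frequency_for_color (board_c : List (List Int)) (col : Int) : Int :=
  ((PySem.List.pyRange 0 board_c.length 1).foldl (fun st i =>
    (PySem.List.pyRange 0 (PySem.List.pyGetD st.1 i []).length 1).foldl (fun st2 j =>
      if PySem.List.pyGetD (PySem.List.pyGetD st2.1 i []) j 0 = col then
        (PySem.List.pySetD st2.1 i (PySem.List.pySetD (PySem.List.pyGetD st2.1 i []) j (-2)), st2.2 + 1)
      else st2) st)
    (board_c, (0 : Int))).2

-- ===== PORT B =====
-- Source B: total = sum(row.count(col) for row in board_c); the subsequent marking loop only mutates board_c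
-- in place and cannot affect the returned total, so the pure port is the counting pass alone.
def frequency_for_color_alt (board_c : List (List Int)) (col : Int) : Int :=
  (board_c.map (fun row => ((PySem.List.count row col : Nat) : Int))).sum

-- ===== PRECONDITION & SPEC =====
def Spec_frequency_for_color (board_c : List (List Int)) (col : Int) (out : Int) : Prop := out = frequency_for_color_alt board_c col
instance (board_c : List (List Int)) (col : Int) (out : Int) : Decidable (Spec_frequency_for_color board_c col out) := by unfold Spec_frequency_for_color; infer_instance

-- ===== CLAIM (what is proved, stated in full; the proofs are below) =====
def Claim_equal_frequency_for_color : Prop := ∀ (board_c : List (List Int)) (col : Int), Dom_frequency_for_color board_c col → Spec_frequency_for_color board_c col (frequency_for_color board_c col)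

-- ===== LEMMAS AND PROOFS =====

-- the row a fully processed inner loop leaves behind
def pvMark (col : Int) (row : List Int) : List Int := row.map (fun x => if x = col then -2 else x)

theorem pv_set_append_cons {α : Type} (pre : List α) (x : α) (rest : List α) (v : α) :
    (pre ++ x :: rest).set pre.length v = pre ++ v :: rest := by
  induction pre with
  | nil => simp
  | cons p ps ih => simp [ih]

theorem pv_getD_append_cons (pre : List Int) (x : Int) (rest : List Int) (d : Int) :
    (pre ++ x :: rest).getD pre.length d = x := by
  induction pre with
  | nil => simp
  | cons p ps _ => simp

theorem pv_inner_loop (col : Int) (i : Nat) :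
    ∀ (rest pre : List Int) (b : List (List Int)) (s : Int),
    i < b.length → b[i]? = some (pre ++ rest) →
    (PySem.List.pyRange (pre.length : Int) ((pre.length : Int) + (rest.length : Int)) 1).foldl
      (fun st2 j =>
        if PySem.List.pyGetD (PySem.List.pyGetD st2.1 (i : Int) []) j 0 = col then
          (PySem.List.pySetD st2.1 (i : Int) (PySem.List.pySetD (PySem.List.pyGetD st2.1 (i : Int) []) j (-2)), st2.2 + 1)
        else st2) (b, s)
    = (b.set i (pre ++ pvMark col rest), s + (rest.count col : Int)) := by
  intro rest
  induction rest with
  | nil =>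
    intro pre b s hi hb
    rw [PySem.List.pyRange_one_eq_nil (by simp only [List.length_nil]; push_cast; omega)]
    simp only [List.getElem?_eq_getElem hi, List.append_nil, Option.some.injEq] at hb
    simp [pvMark, ← hb, List.set_getElem_self]
  | cons x rest ih =>
    intro pre b s hi hb
    rw [PySem.List.pyRange_one_cons (by simp only [List.length_cons]; push_cast; omega)]
    simp only [List.foldl_cons]
    have hrow : PySem.List.pyGetD b (i : Int) [] = pre ++ x :: rest := by
      rw [PySem.List.pyGetD_natCast]
      simp [List.getD, hb]
    have hread : PySem.List.pyGetD (PySem.List.pyGetD b (i : Int) []) (pre.length : Int) 0 = x := by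
      rw [hrow, PySem.List.pyGetD_natCast, pv_getD_append_cons]
    by_cases hx : x = col
    · rw [if_pos (by rw [hread, hx])]
      have hset : PySem.List.pySetD (PySem.List.pyGetD b (i : Int) []) (pre.length : Int) (-2)
          = (pre ++ [(-2 : Int)]) ++ rest := by
        rw [hrow, PySem.List.pySetD_natCast, pv_set_append_cons]; simp
      rw [hset]
      have hb' : (PySem.List.pySetD b (i : Int) ((pre ++ [(-2 : Int)]) ++ rest))[i]?
          = some ((pre ++ [(-2 : Int)]) ++ rest) := by
        rw [PySem.List.pySetD_natCast]
        simp [hi]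
      have hlen : ((pre.length : Int) + 1) = (((pre ++ [(-2 : Int)]).length : Int)) := by
        simp
      have hlen2 : ((pre.length : Int) + ((x :: rest).length : Int))
          = (((pre ++ [(-2 : Int)]).length : Int) + (rest.length : Int)) := by
        simp; omega
      rw [hlen, hlen2]
      rw [ih (pre ++ [(-2 : Int)]) _ (s + 1)
        (by rw [PySem.List.pySetD_natCast]; simpa using hi) hb']
      rw [PySem.List.pySetD_natCast, List.set_set]
      simp only [Prod.mk.injEq]
      refine ⟨by simp [pvMark, hx], by simp [hx]; omega⟩
    · rw [if_neg (by rw [hread]; exact hx)]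
      have hlen : ((pre.length : Int) + 1) = (((pre ++ [x]).length : Int)) := by simp
      have hlen2 : ((pre.length : Int) + ((x :: rest).length : Int))
          = (((pre ++ [x]).length : Int) + (rest.length : Int)) := by simp; omega
      rw [hlen, hlen2]
      rw [ih (pre ++ [x]) b s hi (by simpa using hb)]
      simp only [Prod.mk.injEq]
      refine ⟨by simp [pvMark, hx], by simp [hx]⟩

theorem pv_outer_loop (col : Int) :
    ∀ (rest pre : List (List Int)) (s : Int),
    (PySem.List.pyRange (pre.length : Int) ((pre.length : Int) + (rest.length : Int)) 1).foldl
      (fun st i =>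
        (PySem.List.pyRange 0 ((PySem.List.pyGetD st.1 i []).length : Int) 1).foldl
          (fun st2 j =>
            if PySem.List.pyGetD (PySem.List.pyGetD st2.1 i []) j 0 = col then
              (PySem.List.pySetD st2.1 i (PySem.List.pySetD (PySem.List.pyGetD st2.1 i []) j (-2)), st2.2 + 1)
            else st2) st)
      (pre ++ rest, s)
    = (pre ++ rest.map (pvMark col), s + (rest.map (fun row => ((row.count col : Nat) : Int))).sum) := by
  intro rest
  induction rest with
  | nil =>
    intro pre s
    rw [PySem.List.pyRange_one_eq_nil (by simp only [List.length_nil]; push_cast; omega)]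
    simp
  | cons row rest ih =>
    intro pre s
    rw [PySem.List.pyRange_one_cons (by simp only [List.length_cons]; push_cast; omega)]
    simp only [List.foldl_cons]
    have hi : pre.length < (pre ++ row :: rest).length := by simp
    have hb : (pre ++ row :: rest)[pre.length]? = some (([] : List Int) ++ row) := by
      simp
    have hrow : PySem.List.pyGetD (pre ++ row :: rest) (pre.length : Int) [] = row := by
      rw [PySem.List.pyGetD_natCast]
      simp [List.getD]
    rw [hrow]
    have h0 : PySem.List.pyRange 0 ((row.length : Nat) : Int) 1
        = PySem.List.pyRange ((([] : List Int).length : Nat) : Int)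
            (((([] : List Int).length : Nat) : Int) + ((row.length : Nat) : Int)) 1 := by
      norm_num
    rw [h0, pv_inner_loop col pre.length row [] _ s hi hb]
    rw [List.nil_append, pv_set_append_cons]
    have hlen : ((pre.length : Int) + 1) = (((pre ++ [pvMark col row]).length : Int)) := by simp
    have hlen2 : ((pre.length : Int) + (((row :: rest).length : Nat) : Int))
        = (((pre ++ [pvMark col row]).length : Int) + ((rest.length : Nat) : Int)) := by
      simp; omega
    rw [hlen, hlen2]
    have hre : pre ++ pvMark col row :: rest = (pre ++ [pvMark col row]) ++ rest := by simp
    rw [hre, ih (pre ++ [pvMark col row]) (s + ((List.count col row : Nat) : Int))]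
    simp only [Prod.mk.injEq]
    refine ⟨by simp, by simp; omega⟩

-- ===== VERDICT (by name: the statement is the Claim_ definition above) =====
theorem frequency_for_color_spec : Claim_equal_frequency_for_color := by
  intro board_c col _
  unfold Spec_frequency_for_color frequency_for_color frequency_for_color_alt
  have key := pv_outer_loop col board_c [] 0
  simp only [List.nil_append, List.length_nil, Nat.cast_zero, zero_add] at key
  rw [key]
  simp [PySem.List.count_eq]
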